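-- pv_equiv track=rewrite | github.com/CharlesCNorton/AI-Bootstrap | refuted-unlikely-incomplete/Shifted-pythagorean/tests/test4b.py | find_solutions_for_z
-- ===== SOURCE A (Python) =====
-- from math import sqrt, isqrt
-- from typing import Set, Tuple, List, Dict
--
-- def find_solutions_for_z(z: int) -> List[Tuple[int, int, int]]:
--     """Find all solutions for a given z-value"""
--     solutions = []
--     z_squared_plus_1 = z*z + 1
--
--     # Optimize the search range
--     max_x = isqrt(z_squared_plus_1 - 1)
--
--     for x in range(2, max_x + 1):
--         y_squared = z_squared_plus_1 - x*x
--         if y_squared > 0: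
--             y = isqrt(y_squared)
--             if y*y == y_squared and y > x:
--                 solutions.append((x, y, z))
--
--     return solutions
-- ===== SOURCE B (Python) =====
-- from math import isqrt
-- from typing import Tuple, List
--
-- def find_solutions_for_z(z: int) -> List[Tuple[int, int, int]]:
--     """Find all solutions for a given z-value (two converging pointers)."""
--     N = z*z + 1
--     solutions = []
--     lo, hi = 2, isqrt(N)
--     while lo < hi:
--         s = lo*lo + hi*hi
--         if s == N:
--             solutions.append((lo, hi, z))
--             lo += 1
--             hi -= 1
--         elif s < N:
--             lo += 1
--         else:
--             hi -= 1
--     return solutions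
-- ===== Notes on version B (the rewrite author's own statement) =====
-- stated objective: alternative
-- what changed: Replaces the per-x isqrt/perfect-square test over the whole range with two integer pointers lo/hi converging on lo*lo+hi*hi = z*z+1, emitting each hit and advancing both pointers; measured runtime is about the same.
import Mathlib
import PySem

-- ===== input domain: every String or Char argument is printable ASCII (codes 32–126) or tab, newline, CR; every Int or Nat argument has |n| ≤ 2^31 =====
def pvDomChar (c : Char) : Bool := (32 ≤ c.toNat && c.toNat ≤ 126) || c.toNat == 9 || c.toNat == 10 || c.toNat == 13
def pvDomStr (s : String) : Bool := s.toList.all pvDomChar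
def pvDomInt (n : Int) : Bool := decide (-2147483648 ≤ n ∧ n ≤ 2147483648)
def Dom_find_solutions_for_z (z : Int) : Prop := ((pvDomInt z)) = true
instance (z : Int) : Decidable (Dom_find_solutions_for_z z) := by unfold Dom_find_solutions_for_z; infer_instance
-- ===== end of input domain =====

-- B replaces A's per-x isqrt/perfect-square test with two converging pointers (alternative algorithm; same output).

-- ===== PORT A =====
-- math.isqrt is ported as Mathlib's Int.sqrt (= Nat.sqrt of toNat), exact for nonnegative
-- arguments; A only calls it on nonnegative arguments (z*z and, after the > 0 guard, y_squared).
def find_solutions_for_z (z : Int) : List (Int × Int × Int) :=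
  let z_squared_plus_1 := z*z + 1
  let max_x := Int.sqrt (z_squared_plus_1 - 1)
  (PySem.List.pyRange 2 (max_x + 1) 1).foldl
    (fun solutions x =>
      let y_squared := z_squared_plus_1 - x*x
      if y_squared > 0 then
        let y := Int.sqrt y_squared
        if y*y = y_squared ∧ y > x then solutions ++ [(x, y, z)] else solutions
      else solutions)
    []

-- ===== PORT B =====
-- B's while loop: two pointers converging on lo*lo + hi*hi = N.
-- The Nat fuel only makes the recursion structural; with fuel ≥ hi - lo (as passed below)
-- it is never exhausted before the loop guard lo < hi fails.
def pvTwoPtr (N z : Int) : Nat → Int → Int → List (Int × Int × Int)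
  | 0, _, _ => []
  | fuel+1, lo, hi =>
    if lo < hi then
      let s := lo*lo + hi*hi
      if s = N then (lo, hi, z) :: pvTwoPtr N z fuel (lo+1) (hi-1)
      else if s < N then pvTwoPtr N z fuel (lo+1) hi
      else pvTwoPtr N z fuel lo (hi-1)
    else []

def find_solutions_for_z_alt (z : Int) : List (Int × Int × Int) :=
  let N := z*z + 1
  pvTwoPtr N z (Int.sqrt N).toNat 2 (Int.sqrt N)

-- ===== PRECONDITION & SPEC =====
def Spec_find_solutions_for_z (z : Int) (out : List (Int × Int × Int)) : Prop := out = find_solutions_for_z_alt z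
instance (z : Int) (out : List (Int × Int × Int)) : Decidable (Spec_find_solutions_for_z z out) := by unfold Spec_find_solutions_for_z; infer_instance

-- ===== CLAIM (what is proved, stated in full; the proofs are below) =====
def Claim_equal_find_solutions_for_z : Prop := ∀ (z : Int), Dom_find_solutions_for_z z → Spec_find_solutions_for_z z (find_solutions_for_z z)

-- ===== LEMMAS AND PROOFS =====

-- A's per-x test as an Option-valued function (proof-side reference).
def pvTri (N z x : Int) : Option (Int × Int × Int) :=
  if N - x*x > 0 then
    if Int.sqrt (N - x*x) * Int.sqrt (N - x*x) = N - x*x ∧ Int.sqrt (N - x*x) > x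
    then some (x, Int.sqrt (N - x*x), z) else none
  else none

lemma le_int_sqrt {a n : Int} (ha : 0 ≤ a) (h : a*a ≤ n) : a ≤ Int.sqrt n := by
  have hn : 0 ≤ n := le_trans (mul_nonneg ha ha) h
  have h1 : (a.toNat * a.toNat : ℕ) ≤ n.toNat := by
    apply Int.ofNat_le.mp
    push_cast
    rw [Int.toNat_of_nonneg ha, Int.toNat_of_nonneg hn]
    exact h
  have h2 : a.toNat ≤ Nat.sqrt n.toNat := Nat.le_sqrt.mpr h1
  calc a = (a.toNat : Int) := (Int.toNat_of_nonneg ha).symm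
    _ ≤ (Nat.sqrt n.toNat : Int) := by exact_mod_cast h2
    _ = Int.sqrt n := rfl

lemma int_sqrt_mul_self {b : Int} (hb : 0 ≤ b) : Int.sqrt (b*b) = b := by
  rw [Int.sqrt_eq, Int.natAbs_of_nonneg hb]

lemma pvTri_some_iff {N z x : Int} (hx : 0 ≤ x) {t : Int × Int × Int} :
    pvTri N z x = some t ↔ ∃ y, t = (x, y, z) ∧ y*y = N - x*x ∧ x < y ∧ 0 ≤ y := by
  unfold pvTri
  constructor
  · intro h
    split_ifs at h with h1 h2
    · exact ⟨Int.sqrt (N - x*x), (Option.some_inj.mp h).symm, h2.1, h2.2, Int.sqrt_nonneg _⟩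
  · rintro ⟨y, rfl, hy, hxy, hy0⟩
    have h1 : N - x*x > 0 := by nlinarith
    have hs : Int.sqrt (N - x*x) = y := by rw [← hy, int_sqrt_mul_self hy0]
    rw [if_pos h1, hs, if_pos ⟨hy, hxy⟩]

-- A's foldl-with-append equals filterMap over the same range.
lemma foldl_body_eq (N z : Int) (l : List Int) (acc : List (Int × Int × Int)) :
    l.foldl (fun solutions x =>
      let y_squared := N - x*x
      if y_squared > 0 then
        let y := Int.sqrt y_squared
        if y*y = y_squared ∧ y > x then solutions ++ [(x, y, z)] else solutions
      else solutions) acc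
    = acc ++ l.filterMap (pvTri N z) := by
  induction l generalizing acc with
  | nil => simp
  | cons x xs ih =>
    rw [List.foldl_cons, List.filterMap_cons]
    dsimp only
    by_cases h1 : N - x*x > 0
    · by_cases h2 : Int.sqrt (N - x*x) * Int.sqrt (N - x*x) = N - x*x ∧ Int.sqrt (N - x*x) > x
      · have ht : pvTri N z x = some (x, Int.sqrt (N - x*x), z) := by
          unfold pvTri; rw [if_pos h1, if_pos h2]
        rw [if_pos h1, if_pos h2, ih, ht]
        simp
      · have ht : pvTri N z x = none := by
          unfold pvTri; rw [if_pos h1, if_neg h2]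
        rw [if_pos h1, if_neg h2, ih, ht]
    · have ht : pvTri N z x = none := by
        unfold pvTri; rw [if_neg h1]
      rw [if_neg h1, ih, ht]

lemma pyRange_empty {a b : Int} (h : b ≤ a) : PySem.List.pyRange a b 1 = [] := by
  rw [PySem.List.pyRange_one]
  have : (b - a).toNat = 0 := by omega
  simp [this]

-- The two-pointer loop computes exactly A's filterMap, under the loop invariant that
-- every solution with x ≥ lo has y ≤ hi.
lemma twoPtr_eq (N z : Int) :
    ∀ (fuel : ℕ) (lo hi : Int), (hi - lo).toNat ≤ fuel → 2 ≤ lo → 0 ≤ hi →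
    (∀ a b : Int, lo ≤ a → a < b → a*a + b*b = N → b ≤ hi) →
    pvTwoPtr N z fuel lo hi
      = (PySem.List.pyRange lo (Int.sqrt (N-1) + 1) 1).filterMap (pvTri N z) := by
  intro fuel
  induction fuel with
  | zero =>
    intro lo hi hf h2 h0 hinv
    rw [pvTwoPtr]
    symm
    rw [List.filterMap_eq_nil_iff]
    intro x hx
    rw [PySem.List.mem_pyRange_one] at hx
    by_contra hne
    obtain ⟨t, ht⟩ := Option.ne_none_iff_exists'.mp hne
    obtain ⟨y, _, hy, hxy, hy0⟩ := (pvTri_some_iff (by omega : (0:Int) ≤ x)).mp ht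
    have : y ≤ hi := hinv x y hx.1 hxy (by linarith)
    omega
  | succ n ih =>
    intro lo hi hf h2 h0 hinv
    by_cases hlh : lo < hi
    · rw [pvTwoPtr, if_pos hlh]
      dsimp only
      by_cases hs : lo*lo + hi*hi = N
      · rw [if_pos hs]
        -- (lo, hi) is a solution: it heads the range and pvTri lo hits it
        have hlom : lo ≤ Int.sqrt (N-1) := by
          apply le_int_sqrt (by omega)
          nlinarith
        have hcons : PySem.List.pyRange lo (Int.sqrt (N-1) + 1) 1
            = lo :: PySem.List.pyRange (lo+1) (Int.sqrt (N-1) + 1) 1 :=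
          PySem.List.pyRange_one_cons (by omega)
        have htri : pvTri N z lo = some (lo, hi, z) :=
          (pvTri_some_iff (by omega)).mpr ⟨hi, rfl, by linarith, hlh, h0⟩
        rw [hcons, List.filterMap_cons, htri]
        congr 1
        apply ih (lo+1) (hi-1) (by omega) (by omega) (by omega)
        intro a b ha hab hsum
        have hbh : b ≤ hi := hinv a b (by omega) hab hsum
        by_contra hbh1
        have hbhi : b = hi := by omega
        have : a*a = lo*lo := by nlinarith
        have : a = lo := by nlinarith
        omega
      · rw [if_neg hs]
        by_cases hlt : lo*lo + hi*hi < N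
        · rw [if_pos hlt]
          -- no solution at x = lo: its y would exceed hi
          have htri : pvTri N z lo = none := by
            by_contra hne
            obtain ⟨t, ht⟩ := Option.ne_none_iff_exists'.mp hne
            obtain ⟨y, _, hy, hxy, hy0⟩ := (pvTri_some_iff (by omega : (0:Int) ≤ lo)).mp ht
            have hyh : y ≤ hi := hinv lo y le_rfl hxy (by linarith)
            nlinarith
          have hstep : (PySem.List.pyRange lo (Int.sqrt (N-1) + 1) 1).filterMap (pvTri N z)
              = (PySem.List.pyRange (lo+1) (Int.sqrt (N-1) + 1) 1).filterMap (pvTri N z) := by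
            by_cases hr : lo < Int.sqrt (N-1) + 1
            · rw [PySem.List.pyRange_one_cons hr, List.filterMap_cons, htri]
            · rw [pyRange_empty (by omega), pyRange_empty (by omega)]
          rw [hstep]
          exact ih (lo+1) hi (by omega) (by omega) h0
            (fun a b ha hab hsum => hinv a b (by omega) hab hsum)
        · rw [if_neg hlt]
          -- s > N: no solution has y = hi, so hi can drop
          apply ih lo (hi-1) (by omega) h2 (by omega)
          intro a b ha hab hsum
          have hbh : b ≤ hi := hinv a b ha hab hsum
          by_contra hbh1
          have hbhi : b = hi := by omega
          have hgt : N < lo*lo + hi*hi := by omega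
          nlinarith
    · rw [pvTwoPtr, if_neg hlh]
      symm
      rw [List.filterMap_eq_nil_iff]
      intro x hx
      rw [PySem.List.mem_pyRange_one] at hx
      by_contra hne
      obtain ⟨t, ht⟩ := Option.ne_none_iff_exists'.mp hne
      obtain ⟨y, _, hy, hxy, hy0⟩ := (pvTri_some_iff (by omega : (0:Int) ≤ x)).mp ht
      have : y ≤ hi := hinv x y hx.1 hxy (by linarith)
      omega

-- ===== VERDICT (by name: the statement is the Claim_ definition above) =====
theorem find_solutions_for_z_spec : Claim_equal_find_solutions_for_z := by
  intro z _
  unfold Spec_find_solutions_for_z find_solutions_for_z find_solutions_for_z_alt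
  dsimp only
  rw [foldl_body_eq, List.nil_append]
  have h := twoPtr_eq (z*z+1) z (Int.sqrt (z*z+1)).toNat 2 (Int.sqrt (z*z+1))
    (by omega) le_rfl (Int.sqrt_nonneg _)
    (fun a b ha hab hsum => le_int_sqrt (by omega) (by nlinarith [mul_self_nonneg a]))
  rw [h]
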